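-- pv_equiv track=rewrite | github.com/Bl4cKc34sEr/Dragoman--The-Decoder | Transposition.py | ordering
-- ===== SOURCE A (Python) =====
-- def ordering(keyword):
--   sequence = []
--   for pos, ch in enumerate(keyword):
--     previousLetters = keyword[:pos]
--     newNumber = 1
--     for previousPos, previousCh in enumerate(previousLetters):
--       if previousCh > ch:
--         sequence[previousPos] += 1
--       else:
--         newNumber += 1
--     sequence.append(newNumber)
--   return sequence
-- ===== SOURCE B (Python) =====
-- def ordering(keyword):
--     # rank of each character computed independently by counting:
--     # 1 + (chars anywhere strictly smaller) + (equal chars strictly before)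
--     return [1 + sum(d < c for d in keyword) + keyword[:i].count(c)
--             for i, c in enumerate(keyword)]
-- ===== Notes on version B (the rewrite author's own statement) =====
-- stated objective: simpler
-- what changed: Replaces A's forward sweep that mutates previously assigned ranks with a one-line comprehension computing each rank independently as 1 + (strictly smaller chars anywhere) + (equal chars strictly before).
import Mathlib
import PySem

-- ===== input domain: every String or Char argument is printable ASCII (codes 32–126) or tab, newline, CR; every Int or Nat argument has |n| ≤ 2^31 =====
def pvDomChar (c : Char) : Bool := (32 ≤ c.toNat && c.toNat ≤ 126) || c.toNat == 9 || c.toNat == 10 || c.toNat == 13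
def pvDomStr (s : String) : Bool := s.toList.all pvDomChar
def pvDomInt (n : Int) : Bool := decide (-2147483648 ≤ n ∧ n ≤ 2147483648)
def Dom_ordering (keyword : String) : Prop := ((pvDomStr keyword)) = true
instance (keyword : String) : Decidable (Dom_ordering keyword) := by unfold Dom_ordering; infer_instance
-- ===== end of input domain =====

-- B computes each rank independently by counting instead of A's mutating forward sweep; objective: simpler.

-- ===== PORT A =====
-- inner loop: 'for previousPos, previousCh in enumerate(previousLetters): if previousCh > ch:
-- sequence[previousPos] += 1 else: newNumber += 1' — sequence has exactly the length of
-- previousLetters, and previousPos walks it front to back, so the indexed mutation is the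
-- lockstep structural recursion over (previousLetters, sequence).
def orderingInner (c : Char) : List Char → List Int → Int → (List Int × Int)
  | p :: ps, x :: xs, n =>
      if p > c then
        let r := orderingInner c ps xs n
        ((x + 1) :: r.1, r.2)
      else
        let r := orderingInner c ps xs (n + 1)
        (x :: r.1, r.2)
  | _, seq, n => (seq, n)

def ordering (keyword : String) : List Int :=
  let cs := keyword.toList
  (PySem.List.enumerate cs).foldl
    (fun sequence pc =>
      let previousLetters := cs.take pc.1.toNat   -- keyword[:pos], pos ≥ 0
      let r := orderingInner pc.2 previousLetters sequence 1
      r.1 ++ [r.2])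
    []

-- ===== PORT B =====
-- Source B: [1 + sum(d < c for d in keyword) + keyword[:i].count(c) for i, c in enumerate(keyword)]
-- (the 0/1 bool sum is List.countP)
def ordering_alt (keyword : String) : List Int :=
  let cs := keyword.toList
  (PySem.List.enumerate cs).map
    (fun ic => 1 + ((cs.countP (fun d => d < ic.2) : Int))
                 + (((cs.take ic.1.toNat).count ic.2 : Int)))

-- ===== PRECONDITION & SPEC =====
def Spec_ordering (keyword : String) (out : List Int) : Prop := out = ordering_alt keyword
instance (keyword : String) (out : List Int) : Decidable (Spec_ordering keyword out) := by unfold Spec_ordering; infer_instance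

-- ===== CLAIM (what is proved, stated in full; the proofs are below) =====
def Claim_equal_ordering : Prop := ∀ (keyword : String), Dom_ordering keyword → Spec_ordering keyword (ordering keyword)

-- ===== LEMMAS AND PROOFS =====

-- the rank of position j after the first k outer iterations (for j < k)
def pvVal (cs : List Char) (k j : Nat) : Int :=
  1 + (((cs.take k).countP (fun d => d < cs[j]!) : Int))
    + (((cs.take j).count cs[j]! : Int))

theorem orderingInner_spec (c : Char) :
    ∀ (prev : List Char) (seq : List Int) (n : Int), prev.length = seq.length →
    orderingInner c prev seq n =
      (List.zipWith (fun p x => if c < p then x + 1 else x) prev seq,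
       n + ((prev.countP (fun p => p ≤ c) : Int))) := by
  intro prev
  induction prev with
  | nil => intro seq n h; cases seq <;> simp_all [orderingInner]
  | cons p ps ih =>
    intro seq n h
    cases seq with
    | nil => simp at h
    | cons x xs =>
      simp only [List.length_cons, Nat.succ_inj] at h
      by_cases hc : c < p
      · simp [orderingInner, hc, ih xs n h, not_le.mpr hc]
      · have hle : p ≤ c := not_lt.mp hc
        simp [orderingInner, hc, ih xs (n + 1) h, hle]
        ring

theorem countP_le_split (c : Char) :
    ∀ (l : List Char), l.countP (fun p => p ≤ c) = l.countP (fun p => p < c) + l.count c := by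
  intro l
  induction l with
  | nil => simp
  | cons p ps ih =>
    simp only [List.countP_cons, List.count_cons, ih]
    rcases lt_trichotomy p c with h | h | h
    · simp [le_of_lt h, h, (ne_of_lt h : p ≠ c)]
      omega
    · subst h
      simp
      omega
    · simp [not_le.mpr h, not_lt.mpr (le_of_lt h), (ne_of_gt h : p ≠ c)]

theorem ordering_fold_inv (cs : List Char) :
    ∀ (k : Nat), k ≤ cs.length →
    ((PySem.List.enumerate cs).take k).foldl
      (fun sequence pc =>
        let previousLetters := cs.take pc.1.toNat
        let r := orderingInner pc.2 previousLetters sequence 1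
        r.1 ++ [r.2]) []
    = (List.range k).map (pvVal cs k) := by
  intro k
  induction k with
  | zero => simp
  | succ k ih =>
    intro hk
    have hklt : k < cs.length := hk
    have hkl : k < (PySem.List.enumerate cs).length := by
      simpa [PySem.List.length_enumerate] using hklt
    have htake : (PySem.List.enumerate cs).take (k + 1)
        = (PySem.List.enumerate cs).take k ++ [((k : Int), cs[k])] := by
      rw [List.take_add_one]
      simp [List.getElem?_eq_getElem hkl, PySem.List.getElem_enumerate]
    rw [htake, List.foldl_append, ih (le_of_lt hklt)]
    simp only [List.foldl_cons, List.foldl_nil]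
    have hlen : (cs.take k).length = ((List.range k).map (pvVal cs k)).length := by
      simp [List.length_take, Nat.min_eq_left (le_of_lt hklt)]
    rw [show ((k : Int)).toNat = k from rfl,
        orderingInner_spec cs[k] (cs.take k) ((List.range k).map (pvVal cs k)) 1 hlen,
        List.range_succ, List.map_append, List.map_singleton]
    have htk : cs.take (k + 1) = cs.take k ++ [cs[k]] := by
      rw [List.take_add_one]; simp [List.getElem?_eq_getElem hklt]
    congr 1
    -- the bumped prefix equals the ranks at stage k+1
    · apply List.ext_getElem
      · simp [List.length_zipWith, Nat.min_eq_left (le_of_lt hklt)]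
      · intro j h1 h2
        have hj : j < k := by
          simpa [List.length_zipWith, Nat.min_eq_left (le_of_lt hklt)] using h1
        have hjl : j < cs.length := lt_trans hj hklt
        rw [List.getElem_zipWith]
        simp only [List.getElem_map, List.getElem_range]
        have hgj : (cs.take k)[j]'(by simp [Nat.min_eq_left (le_of_lt hklt)]; omega) = cs[j] := by
          simp [List.getElem_take]
        rw [hgj]
        unfold pvVal
        rw [htk]
        have hbang : cs[j]! = cs[j] := getElem!_pos cs j hjl
        rw [hbang, List.countP_append]
        by_cases hc : cs[k] < cs[j]
        · simp [hc]
          ring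
        · simp [hc]
    -- the appended new rank equals pvVal cs (k+1) k
    · unfold pvVal
      have hbang : cs[k]! = cs[k] := getElem!_pos cs k hklt
      rw [hbang, htk, List.countP_append, countP_le_split]
      simp
      ring

theorem ordering_eq_alt (keyword : String) : ordering keyword = ordering_alt keyword := by
  unfold ordering ordering_alt
  set cs := keyword.toList with hcs
  have hn : (PySem.List.enumerate cs).take cs.length = PySem.List.enumerate cs := by
    simp [PySem.List.length_enumerate]
  have := ordering_fold_inv cs cs.length (le_refl _)
  rw [hn] at this
  simp only []
  rw [this]
  apply List.ext_getElem
  · simp [PySem.List.length_enumerate]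
  · intro j h1 h2
    have hj : j < cs.length := by simpa using h1
    simp only [List.getElem_map, List.getElem_range, PySem.List.getElem_enumerate]
    unfold pvVal
    have : cs[j]! = cs[j] := getElem!_pos cs j hj
    simp [this, List.take_length]

-- ===== VERDICT (by name: the statement is the Claim_ definition above) =====
theorem ordering_spec : Claim_equal_ordering := by
  intro keyword _
  unfold Spec_ordering
  exact ordering_eq_alt keyword
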